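-- pv_equiv track=rewrite | github.com/usdot-its-jpo-data-portal/metadata_ingest | metadata_ingest/form_parsers.py | preparse_contactPoints
-- ===== SOURCE A (Python) =====
-- from itertools import groupby
--
-- def preparse_contactPoints(fields):
--     key = lambda x: x[0]
--     contactPointFields = set([k for k in fields if 'contactPoint' in k])
--     roleFieldValTuples = [(*k.split('__')[1:], v['/V']) for k, v in fields.items() if k in contactPointFields]
--     contactFieldGroups = groupby(sorted(roleFieldValTuples, key=key), key=key)
--     contactPoint = [{'hasRole':k,
--                     **{f:v for r,f,v in list(g)}}
--                      for k,g in contactFieldGroups]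
--     for k in contactPointFields:
--         del fields[k]
--     return fields, contactPoint
-- ===== SOURCE B (Python) =====
-- def preparse_contactPoints(fields):
--     grouped = {}
--     for k in list(fields):
--         if 'contactPoint' not in k:
--             continue
--         v = fields.pop(k)
--         _prefix, role, field = k.split('__')
--         grouped.setdefault(role, {})[field] = v['/V']
--     contactPoint = [{'hasRole': role, **grouped[role]} for role in sorted(grouped)]
--     return fields, contactPoint
-- ===== Notes on version B (the rewrite author's own statement) =====
-- stated objective: idiomatic
-- what changed: Replaces the set-comprehension + tuple list + sorted/groupby pipeline with a single pass that pops contactPoint keys and populates a role -> {field: value} dict, then emits groups over sorted roles.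
import Mathlib
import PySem

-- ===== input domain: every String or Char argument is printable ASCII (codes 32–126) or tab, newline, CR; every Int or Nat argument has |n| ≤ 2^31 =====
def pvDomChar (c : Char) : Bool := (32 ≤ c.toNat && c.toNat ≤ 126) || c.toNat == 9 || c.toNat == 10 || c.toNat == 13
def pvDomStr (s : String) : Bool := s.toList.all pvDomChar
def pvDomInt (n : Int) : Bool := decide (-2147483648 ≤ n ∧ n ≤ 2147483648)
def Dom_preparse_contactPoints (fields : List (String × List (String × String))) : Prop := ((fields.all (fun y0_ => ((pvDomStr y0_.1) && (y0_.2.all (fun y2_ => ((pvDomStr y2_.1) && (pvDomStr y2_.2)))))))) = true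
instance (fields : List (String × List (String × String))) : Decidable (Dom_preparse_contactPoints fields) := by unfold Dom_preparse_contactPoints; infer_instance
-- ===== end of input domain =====

-- B replaces A's set-comprehension + tuple list + sorted/groupby pipeline by one pass that pops
-- contactPoint keys into a role -> {field: value} dict and emits groups over the sorted roles
-- (objective: idiomatic). Both A and B mutate the argument dict in place (deleting the
-- contactPoint keys); the theorems here are about the RETURN value only.

-- shared input decoding: the argument is a Python dict of dicts (assoc lists with Python's
-- duplicate-key collapse: last value wins, first position kept)
def pvToDict (fields : List (String × List (String × String))) :
    PySem.Dict String (PySem.Dict String String) :=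
  PySem.Dict.ofList (fields.map (fun p => (p.1, PySem.Dict.ofList p.2)))

-- ===== PORT A =====
-- itertools.groupby specialised to key = first component (consecutive runs of equal keys)
def pvGroupbyFst : List (String × String × String) → List (String × List (String × String × String))
  | [] => []
  | t :: ts =>
      (t.1, t :: ts.takeWhile (fun u => u.1 == t.1)) ::
      pvGroupbyFst (ts.dropWhile (fun u => u.1 == t.1))
  termination_by l => l.length
  decreasing_by
    exact Nat.lt_succ_of_le (List.length_dropWhile_le (fun u => u.1 == t.1) ts)

def preparse_contactPoints (fields : List (String × List (String × String))) :
    (List (String × List (String × String))) × (List (List (String × String))) :=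
  let d := pvToDict fields
  let contactPointFields : PySem.Set String :=
    PySem.Set.ofList (d.keys.filter (fun k => PySem.Str.isIn "contactPoint" k))
  let roleFieldValTuples : List (String × String × String) :=
    (d.items.filter (fun p => PySem.Set.contains contactPointFields p.1)).map (fun p =>
      (((PySem.Str.split? p.1 "__").getD []).getD 1 "",
       ((PySem.Str.split? p.1 "__").getD []).getD 2 "",
       (p.2.get? "/V").getD ""))
  let contactFieldGroups := pvGroupbyFst (PySem.List.sorted roleFieldValTuples (fun t => t.1))
  let contactPoint := contactFieldGroups.map (fun g =>
    let inner := g.2.foldl (fun dd t => dd.insert t.2.1 t.2.2)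
      (PySem.Dict.empty : PySem.Dict String String)
    (inner.items.foldl (fun dd q => dd.insert q.1 q.2)
      ((PySem.Dict.empty : PySem.Dict String String).insert "hasRole" g.1)).items)
  let d2 := (contactPointFields : List String).foldl (fun dd k => dd.erase k) d
  (d2.items.map (fun p => (p.1, p.2.items)), contactPoint)

-- ===== PORT B =====
def preparse_contactPoints_alt (fields : List (String × List (String × String))) :
    (List (String × List (String × String))) × (List (List (String × String))) :=
  let d := pvToDict fields
  let st := d.items.foldl
    (fun (st : PySem.Dict String (PySem.Dict String String) ×
               PySem.Dict String (PySem.Dict String String)) p =>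
      if PySem.Str.isIn "contactPoint" p.1 then
        (st.1.erase p.1,
         st.2.modify (((PySem.Str.split? p.1 "__").getD []).getD 1 "") PySem.Dict.empty
           (fun g => g.insert (((PySem.Str.split? p.1 "__").getD []).getD 2 "")
                              ((p.2.get? "/V").getD "")))
      else st)
    (d, PySem.Dict.empty)
  let contactPoint := (PySem.List.sorted st.2.keys (fun r => r)).map (fun r =>
    ((st.2.getD r PySem.Dict.empty).items.foldl (fun dd q => dd.insert q.1 q.2)
      ((PySem.Dict.empty : PySem.Dict String String).insert "hasRole" r)).items)
  (st.1.items.map (fun p => (p.1, p.2.items)), contactPoint)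

-- ===== PRECONDITION & SPEC =====
-- Pre_ excludes exactly the inputs where Python A raises: a contactPoint key whose name does not
-- split into exactly 3 '__'-parts (ValueError at tuple unpacking) or whose value dict lacks '/V'
-- (KeyError); checked on the collapsed dict, since Python receives the argument as a dict.
def Pre_preparse_contactPoints (fields : List (String × List (String × String))) : Prop :=
  ∀ p ∈ (pvToDict fields).items, PySem.Str.isIn "contactPoint" p.1 = true →
    ((PySem.Str.split? p.1 "__").getD []).length = 3 ∧ p.2.contains "/V" = true

instance (fields : List (String × List (String × String))) :
    Decidable (Pre_preparse_contactPoints fields) := by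
  unfold Pre_preparse_contactPoints; infer_instance

def pvWitness_preparse_contactPoints : (List (String × List (String × String))) :=
  [("contactPoint__poc__fn", [("/V", "Bob")]),
   ("contactPoint__poc__hasEmail", [("/V", "b@x.gov")]),
   ("title", [("/V", "t")])]

def Spec_preparse_contactPoints (fields : List (String × List (String × String))) (out : (List (String × List (String × String))) × (List (List (String × String)))) : Prop := out = preparse_contactPoints_alt fields
instance (fields : List (String × List (String × String))) (out : (List (String × List (String × String))) × (List (List (String × String)))) : Decidable (Spec_preparse_contactPoints fields out) := by unfold Spec_preparse_contactPoints; infer_instance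

-- ===== CLAIM (what is proved, stated in full; the proofs are below) =====
def Claim_equal_preparse_contactPoints : Prop := ∀ (fields : List (String × List (String × String))), Dom_preparse_contactPoints fields → Pre_preparse_contactPoints fields → Spec_preparse_contactPoints fields (preparse_contactPoints fields)

-- ===== LEMMAS AND PROOFS =====

-- B's paired fold splits into two independent conditional folds
theorem pv_foldl_pair_if {γ α β : Type} (l : List γ) (c : γ → Bool)
    (f : α → γ → α) (g : β → γ → β) (a : α) (b : β) :
    l.foldl (fun st p => if c p then (f st.1 p, g st.2 p) else st) (a, b)
    = (l.foldl (fun x p => if c p then f x p else x) a,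
       l.foldl (fun y p => if c p then g y p else y) b) := by
  induction l generalizing a b with
  | nil => rfl
  | cons p l ih => by_cases h : c p = true <;> simp [h, ih]

-- a conditional fold is a fold over the filtered list
theorem pv_foldl_if_eq_filter {γ α : Type} (l : List γ) (c : γ → Bool)
    (f : α → γ → α) (a : α) :
    l.foldl (fun x p => if c p then f x p else x) a = (l.filter c).foldl f a := by
  induction l generalizing a with
  | nil => rfl
  | cons p l ih => by_cases h : c p = true <;> simp [h, ih]

theorem pv_update_nodup {α : Type} [BEq α] [LawfulBEq α] (xs s : List α) (h : (s ++ xs).Nodup) :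
    xs.foldl PySem.Set.add s = s ++ xs := by
  induction xs generalizing s with
  | nil => simp
  | cons x xs ih =>
    have hx : x ∉ s := by
      intro hm
      have := List.disjoint_of_nodup_append h
      exact this hm (by simp)
    rw [List.foldl_cons, PySem.Set.add_of_not_mem hx, ih (s ++ [x]) (by simpa using h)]
    simp

-- set(xs) of a duplicate-free list is the list itself
theorem pv_ofList_nodup {α : Type} [BEq α] [LawfulBEq α] (xs : List α) (h : xs.Nodup) :
    PySem.Set.ofList xs = xs := by
  rw [PySem.Set.ofList_eq_foldl]
  simpa using pv_update_nodup xs [] (by simpa using h)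

-- grouped.getD r: the conditional modify-fold collected exactly the r-tuples, in order
theorem pv_getD_groupfold (ts : List (String × String × String))
    (g0 : PySem.Dict String (PySem.Dict String String)) (r : String) :
    (ts.foldl (fun g t => g.modify t.1 PySem.Dict.empty
        (fun gg => gg.insert t.2.1 t.2.2)) g0).getD r PySem.Dict.empty
    = (ts.filter (fun t => t.1 == r)).foldl (fun gg t => gg.insert t.2.1 t.2.2)
        (g0.getD r PySem.Dict.empty) := by
  induction ts generalizing g0 with
  | nil => rfl
  | cons t ts ih =>
    rw [List.foldl_cons, ih]
    by_cases h : t.1 = r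
    · subst h
      simp [PySem.Dict.getD_modify_self]
    · rw [List.filter_cons]
      simp only [beq_iff_eq, h]
      rw [PySem.Dict.getD_modify_of_ne]
      · simp
      · exact fun hh => h hh.symm


theorem pv_insertBy_pairwise (x : String × String × String) (ys : List (String × String × String))
    (h : ys.Pairwise (fun a b => a.1 ≤ b.1)) :
    (PySem.List.insertBy (fun a b => decide (a.1 < b.1)) x ys).Pairwise (fun a b => a.1 ≤ b.1) := by
  induction ys with
  | nil => simp [PySem.List.insertBy]
  | cons y ys ih =>
    rw [List.pairwise_cons] at h
    obtain ⟨hy, hys⟩ := h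
    by_cases hlt : x.1 < y.1
    · simp only [PySem.List.insertBy, hlt, decide_true, if_pos]
      refine List.pairwise_cons.2 ⟨?_, List.pairwise_cons.2 ⟨hy, hys⟩⟩
      intro u hu
      rcases List.mem_cons.1 hu with rfl | hu
      · exact le_of_lt hlt
      · exact le_trans (le_of_lt hlt) (hy _ hu)
    · simp only [PySem.List.insertBy, hlt, decide_false, Bool.false_eq_true, if_neg, not_false_iff]
      refine List.pairwise_cons.2 ⟨?_, ih hys⟩
      intro u hu
      rw [PySem.List.mem_insertBy] at hu
      rcases hu with rfl | hu
      · exact le_of_not_gt hlt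
      · exact hy _ hu

theorem pv_filter_insertBy (x : String × String × String) (ys : List (String × String × String))
    (r : String) (h : ys.Pairwise (fun a b => a.1 ≤ b.1)) :
    (PySem.List.insertBy (fun a b => decide (a.1 < b.1)) x ys).filter (fun t => t.1 == r)
    = ys.filter (fun t => t.1 == r) ++ (if x.1 == r then [x] else []) := by
  induction ys with
  | nil => simp [PySem.List.insertBy, List.filter]; split <;> simp_all
  | cons y ys ih =>
    rw [List.pairwise_cons] at h
    obtain ⟨hy, hys⟩ := h
    by_cases hlt : x.1 < y.1
    · simp only [PySem.List.insertBy, hlt, decide_true, if_pos]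
      by_cases hxr : x.1 = r
      · subst hxr
        have hnil : (y :: ys).filter (fun t => t.1 == x.1) = [] := by
          rw [List.filter_eq_nil_iff]
          intro u hu
          have : x.1 < u.1 := by
            rcases List.mem_cons.1 hu with rfl | hu
            · exact hlt
            · exact lt_of_lt_of_le hlt (hy _ hu)
          simp [ne_of_gt this]
        rw [List.filter_cons]
        simp [hnil]
      · have hx : (x.1 == r) = false := by simpa using hxr
        simp [List.filter_cons, hx]
    · simp only [PySem.List.insertBy, hlt, decide_false, Bool.false_eq_true, if_neg, not_false_iff]
      rw [List.filter_cons, List.filter_cons, ih hys]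
      by_cases hyr : y.1 = r <;> simp [hyr]

theorem pv_foldl_insertBy_filter (xs acc : List (String × String × String)) (r : String)
    (h : acc.Pairwise (fun a b => a.1 ≤ b.1)) :
    (xs.foldl (fun a x => PySem.List.insertBy (fun a b => decide (a.1 < b.1)) x a) acc).filter
        (fun t => t.1 == r)
    = acc.filter (fun t => t.1 == r) ++ xs.filter (fun t => t.1 == r) := by
  induction xs generalizing acc with
  | nil => simp
  | cons x xs ih =>
    rw [List.foldl_cons, ih _ (pv_insertBy_pairwise x acc h), pv_filter_insertBy x acc r h,
      List.filter_cons]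
    by_cases hxr : x.1 = r <;> simp [hxr]

theorem pv_sorted_filter (ts : List (String × String × String)) (r : String) :
    (PySem.List.sorted ts (fun t => t.1)).filter (fun t => t.1 == r)
    = ts.filter (fun t => t.1 == r) := by
  rw [PySem.List.sorted_eq_foldl_insertBy]
  simpa using pv_foldl_insertBy_filter ts [] r (by simp)

theorem pv_dropWhile_gt (t1 : String) (ts : List (String × String × String))
    (hp : ts.Pairwise (fun a b => a.1 ≤ b.1)) (hge : ∀ u ∈ ts, t1 ≤ u.1) :
    ∀ v ∈ ts.dropWhile (fun u => u.1 == t1), t1 < v.1 := by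
  induction ts with
  | nil => simp
  | cons u ts ih =>
    rw [List.pairwise_cons] at hp
    obtain ⟨hu, hts⟩ := hp
    by_cases h : u.1 = t1
    · rw [List.dropWhile_cons_of_pos (by simp [h])]
      exact ih hts (fun v hv => hge v (List.mem_cons_of_mem _ hv))
    · rw [List.dropWhile_cons_of_neg (by simp [h])]
      intro v hv
      have h1 : t1 < u.1 := lt_of_le_of_ne (hge u (by simp)) (fun e => h e.symm)
      rcases List.mem_cons.1 hv with rfl | hv
      · exact h1
      · exact lt_of_lt_of_le h1 (hu _ hv)

theorem pv_groupby_fst_mem (l : List (String × String × String)) :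
    ∀ r, r ∈ (pvGroupbyFst l).map Prod.fst ↔ r ∈ l.map Prod.fst := by
  induction l using pvGroupbyFst.induct with
  | case1 => simp [pvGroupbyFst]
  | case2 t ts ih =>
    intro r
    rw [pvGroupbyFst]
    simp only [List.map_cons, List.mem_cons, ih r]
    constructor
    · rintro (rfl | hr)
      · exact Or.inl rfl
      · right
        have : r ∈ (ts.dropWhile (fun u => u.1 == t.1)).map Prod.fst := hr
        obtain ⟨v, hv, rfl⟩ := List.mem_map.1 this
        exact List.mem_map.2 ⟨v, (ts.dropWhile_sublist _).mem hv, rfl⟩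
    · rintro (rfl | hr)
      · exact Or.inl rfl
      · obtain ⟨v, hv, rfl⟩ := List.mem_map.1 hr
        rw [← List.takeWhile_append_dropWhile (p := fun u => u.1 == t.1) (l := ts)] at hv
        rcases List.mem_append.1 hv with hv | hv
        · left
          have := List.mem_takeWhile_imp hv
          simpa using this.symm
        · exact Or.inr (List.mem_map.2 ⟨v, hv, rfl⟩)

theorem pv_groupby_fst_lt (l : List (String × String × String))
    (h : l.Pairwise (fun a b => a.1 ≤ b.1)) :
    ((pvGroupbyFst l).map Prod.fst).Pairwise (· < ·) := by
  induction l using pvGroupbyFst.induct with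
  | case1 => simp [pvGroupbyFst]
  | case2 t ts ih =>
    rw [List.pairwise_cons] at h
    obtain ⟨ht, hts⟩ := h
    have hdp : (ts.dropWhile (fun u => u.1 == t.1)).Pairwise (fun a b => a.1 ≤ b.1) :=
      List.Pairwise.sublist (List.dropWhile_sublist _) hts
    rw [pvGroupbyFst, List.map_cons, List.pairwise_cons]
    refine ⟨?_, ih hdp⟩
    intro r hr
    obtain ⟨v, hv, rfl⟩ := List.mem_map.1 ((pv_groupby_fst_mem _ r).1 hr)
    exact pv_dropWhile_gt t.1 ts hts (fun u hu => ht u hu) v hv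

theorem pv_groupby_snd (l : List (String × String × String))
    (h : l.Pairwise (fun a b => a.1 ≤ b.1)) :
    ∀ g ∈ pvGroupbyFst l, g.2 = l.filter (fun t => t.1 == g.1) := by
  induction l using pvGroupbyFst.induct with
  | case1 => simp [pvGroupbyFst]
  | case2 t ts ih =>
    rw [List.pairwise_cons] at h
    obtain ⟨ht, hts⟩ := h
    have hdp : (ts.dropWhile (fun u => u.1 == t.1)).Pairwise (fun a b => a.1 ≤ b.1) :=
      List.Pairwise.sublist (List.dropWhile_sublist _) hts
    intro g hg
    rw [pvGroupbyFst] at hg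
    rcases List.mem_cons.1 hg with rfl | hg
    · -- head group
      have h1 : (ts.takeWhile (fun u => u.1 == t.1)).filter (fun u => u.1 == t.1)
          = ts.takeWhile (fun u => u.1 == t.1) := by
        rw [List.filter_eq_self]
        intro u hu
        simpa using List.mem_takeWhile_imp hu
      have h2 : (ts.dropWhile (fun u => u.1 == t.1)).filter (fun u => u.1 == t.1) = [] := by
        rw [List.filter_eq_nil_iff]
        intro u hu
        have := pv_dropWhile_gt t.1 ts hts (fun u hu => ht u hu) u hu
        simp [ne_of_gt this]
      have hfil : ts.filter (fun u => u.1 == t.1) = ts.takeWhile (fun u => u.1 == t.1) := by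
        conv_lhs => rw [← List.takeWhile_append_dropWhile (p := fun u => u.1 == t.1) (l := ts)]
        rw [List.filter_append, h1, h2, List.append_nil]
      simp only
      rw [List.filter_cons_of_pos (by simp), hfil]
    · -- later group: key is > t.1, so t and the takeWhile-run do not pass the filter
      have hglt : t.1 < g.1 := by
        have hmem : g.1 ∈ (pvGroupbyFst (ts.dropWhile (fun u => u.1 == t.1))).map Prod.fst :=
          List.mem_map.2 ⟨g, hg, rfl⟩
        obtain ⟨v, hv, he⟩ := List.mem_map.1 ((pv_groupby_fst_mem _ g.1).1 hmem)
        rw [← he]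
        exact pv_dropWhile_gt t.1 ts hts (fun u hu => ht u hu) v hv
      have h1 : (ts.takeWhile (fun u => u.1 == t.1)).filter (fun u => u.1 == g.1) = [] := by
        rw [List.filter_eq_nil_iff]
        intro u hu
        have hut : u.1 = t.1 := by simpa using List.mem_takeWhile_imp hu
        simp [hut, ne_of_lt hglt]
      rw [ih hdp g hg, List.filter_cons_of_neg (by simp [ne_of_lt hglt])]
      conv_rhs => rw [← List.takeWhile_append_dropWhile (p := fun u => u.1 == t.1) (l := ts)]
      rw [List.filter_append, h1, List.nil_append]

theorem pv_roles_eq (ts : List (String × String × String)) :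
    PySem.List.sorted (PySem.Set.ofList (ts.map Prod.fst)) (fun r => r)
    = (pvGroupbyFst (PySem.List.sorted ts (fun t => t.1))).map Prod.fst := by
  have hsp : (PySem.List.sorted ts (fun t => t.1)).Pairwise (fun a b => a.1 ≤ b.1) :=
    PySem.List.sorted_pairwise ts (fun t => t.1)
  have hlt := pv_groupby_fst_lt _ hsp
  refine PySem.List.sorted_eq_of_perm_of_pairwise_lt _ _ _ ?_ hlt
  have hnd : ((pvGroupbyFst (PySem.List.sorted ts (fun t => t.1))).map Prod.fst).Nodup :=
    hlt.imp ne_of_lt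
  rw [List.perm_ext_iff_of_nodup hnd (PySem.Set.nodup_ofList _)]
  intro r
  rw [pv_groupby_fst_mem, PySem.Set.mem_ofList]
  constructor
  · rintro h
    obtain ⟨v, hv, rfl⟩ := List.mem_map.1 h
    exact List.mem_map.2 ⟨v, (PySem.List.mem_sorted _ _ _ _).1 hv, rfl⟩
  · rintro h
    obtain ⟨v, hv, rfl⟩ := List.mem_map.1 h
    exact List.mem_map.2 ⟨v, (PySem.List.mem_sorted _ _ _ _).2 hv, rfl⟩


theorem pv_map_groupby {β : Type} (l : List (String × String × String))
    (h : l.Pairwise (fun a b => a.1 ≤ b.1))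
    (F : String → List (String × String × String) → β) :
    (pvGroupbyFst l).map (fun g => F g.1 g.2)
    = ((pvGroupbyFst l).map Prod.fst).map (fun r => F r (l.filter (fun t => t.1 == r))) := by
  rw [List.map_map]
  apply List.map_congr_left
  intro g hg
  simp only [Function.comp]
  rw [pv_groupby_snd l h g hg]

-- the common normal form of both ports (proof-only helper)
def pvMid (d : PySem.Dict String (PySem.Dict String String)) :
    (List (String × List (String × String))) × (List (List (String × String))) :=
  let ts : List (String × String × String) :=
    (d.items.filter (fun p => PySem.Str.isIn "contactPoint" p.1)).map (fun p =>
      (((PySem.Str.split? p.1 "__").getD []).getD 1 "",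
       ((PySem.Str.split? p.1 "__").getD []).getD 2 "",
       (p.2.get? "/V").getD ""))
  ((((d.keys.filter (fun k => PySem.Str.isIn "contactPoint" k)).foldl
      (fun dd k => dd.erase k) d).items.map (fun p => (p.1, p.2.items))),
   (pvGroupbyFst (PySem.List.sorted ts (fun t => t.1))).map (fun g =>
     ((g.2.foldl (fun dd t => dd.insert t.2.1 t.2.2)
        (PySem.Dict.empty : PySem.Dict String String)).items.foldl
        (fun dd q => dd.insert q.1 q.2)
        ((PySem.Dict.empty : PySem.Dict String String).insert "hasRole" g.1)).items))

theorem pvA_eq (fields : List (String × List (String × String))) :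
    preparse_contactPoints fields = pvMid (pvToDict fields) := by
  unfold preparse_contactPoints pvMid
  have hnk : (pvToDict fields).keys.Nodup := by
    unfold pvToDict; exact PySem.Dict.nodup_keys_ofList _
  simp only []
  congr 1
  · rw [pv_ofList_nodup _ (List.Nodup.filter _ hnk)]
  · have hts : (((pvToDict fields).items.filter (fun p =>
        PySem.Set.contains (PySem.Set.ofList ((pvToDict fields).keys.filter
          (fun k => PySem.Str.isIn "contactPoint" k))) p.1))
        : List (String × PySem.Dict String String))
        = (pvToDict fields).items.filter (fun p => PySem.Str.isIn "contactPoint" p.1) := by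
      rw [pv_ofList_nodup _ (List.Nodup.filter _ hnk)]
      apply List.filter_congr
      intro p hp
      cases hc : PySem.Str.isIn "contactPoint" p.1 with
      | true =>
        simp only [PySem.Str.isIn_eq] at hc
        simp [PySem.Set.contains, List.mem_filter,
          PySem.Dict.mem_keys_of_mem_items _ hp]
        exact hc
      | false =>
        simp only [PySem.Str.isIn_eq] at hc
        simp [PySem.Set.contains, List.mem_filter]
        intro _
        exact hc
    rw [hts]

theorem pvB_eq (fields : List (String × List (String × String))) :
    preparse_contactPoints_alt fields = pvMid (pvToDict fields) := by
  unfold preparse_contactPoints_alt pvMid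
  simp only []
  rw [pv_foldl_pair_if (pvToDict fields).items
      (fun p => PySem.Str.isIn "contactPoint" p.1)
      (fun x p => x.erase p.1)
      (fun y p => y.modify (((PySem.Str.split? p.1 "__").getD []).getD 1 "") PySem.Dict.empty
        (fun g => g.insert (((PySem.Str.split? p.1 "__").getD []).getD 2 "")
          ((p.2.get? "/V").getD "")))
      (pvToDict fields) PySem.Dict.empty]
  simp only []
  rw [pv_foldl_if_eq_filter (pvToDict fields).items
      (fun p => PySem.Str.isIn "contactPoint" p.1) (fun x p => x.erase p.1) (pvToDict fields),
    pv_foldl_if_eq_filter (pvToDict fields).items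
      (fun p => PySem.Str.isIn "contactPoint" p.1)
      (fun y p => y.modify (((PySem.Str.split? p.1 "__").getD []).getD 1 "") PySem.Dict.empty
        (fun g => g.insert (((PySem.Str.split? p.1 "__").getD []).getD 2 "")
          ((p.2.get? "/V").getD ""))) PySem.Dict.empty]
  have hg : ((pvToDict fields).items.filter
        (fun p => PySem.Str.isIn "contactPoint" p.1)).foldl
      (fun y p => y.modify (((PySem.Str.split? p.1 "__").getD []).getD 1 "") PySem.Dict.empty
        (fun g => g.insert (((PySem.Str.split? p.1 "__").getD []).getD 2 "")
          ((p.2.get? "/V").getD ""))) PySem.Dict.empty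
      = (((pvToDict fields).items.filter
          (fun p => PySem.Str.isIn "contactPoint" p.1)).map (fun p =>
            (((PySem.Str.split? p.1 "__").getD []).getD 1 "",
             ((PySem.Str.split? p.1 "__").getD []).getD 2 "",
             (p.2.get? "/V").getD ""))).foldl
        (fun g t => g.modify t.1 PySem.Dict.empty
          (fun gg => gg.insert t.2.1 t.2.2)) PySem.Dict.empty := by
    rw [List.foldl_map]
  rw [hg]
  rw [PySem.Dict.keys_foldl_modify_key (((pvToDict fields).items.filter
          (fun p => PySem.Str.isIn "contactPoint" p.1)).map (fun p =>
            (((PySem.Str.split? p.1 "__").getD []).getD 1 "",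
             ((PySem.Str.split? p.1 "__").getD []).getD 2 "",
             (p.2.get? "/V").getD "")))
      Prod.fst PySem.Dict.empty (fun _ t => fun gg => gg.insert t.2.1 t.2.2) PySem.Dict.empty]
  have hupd : PySem.Set.update
      (PySem.Dict.empty : PySem.Dict String (PySem.Dict String String)).keys
      ((((pvToDict fields).items.filter
          (fun p => PySem.Str.isIn "contactPoint" p.1)).map (fun p =>
            (((PySem.Str.split? p.1 "__").getD []).getD 1 "",
             ((PySem.Str.split? p.1 "__").getD []).getD 2 "",
             (p.2.get? "/V").getD ""))).map Prod.fst)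
      = PySem.Set.ofList ((((pvToDict fields).items.filter
          (fun p => PySem.Str.isIn "contactPoint" p.1)).map (fun p =>
            (((PySem.Str.split? p.1 "__").getD []).getD 1 "",
             ((PySem.Str.split? p.1 "__").getD []).getD 2 "",
             (p.2.get? "/V").getD ""))).map Prod.fst) := by
    rw [PySem.Dict.keys_empty, PySem.Set.ofList_eq_foldl]
    rfl
  rw [hupd, pv_roles_eq]
  simp only [pv_getD_groupfold, PySem.Dict.getD_empty]
  have hS : (PySem.List.sorted (((pvToDict fields).items.filter
          (fun p => PySem.Str.isIn "contactPoint" p.1)).map (fun p =>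
            (((PySem.Str.split? p.1 "__").getD []).getD 1 "",
             ((PySem.Str.split? p.1 "__").getD []).getD 2 "",
             (p.2.get? "/V").getD ""))) (fun t => t.1)).Pairwise
      (fun a b => a.1 ≤ b.1) := PySem.List.sorted_pairwise _ _
  rw [pv_map_groupby _ hS (fun r gl =>
    (List.foldl (fun dd q => dd.insert q.1 q.2) (PySem.Dict.empty.insert "hasRole" r)
      (List.foldl (fun dd t => dd.insert t.2.1 t.2.2) PySem.Dict.empty gl).items).items)]
  simp only [pv_sorted_filter]
  congr 1
  have hkeys : (pvToDict fields).keys.filter (fun k => PySem.Str.isIn "contactPoint" k)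
      = ((pvToDict fields).items.filter
          (fun p => PySem.Str.isIn "contactPoint" p.1)).map (fun x => x.1) := by
    simp only [PySem.Dict.keys]
    rw [List.filter_map]
    rfl
  rw [hkeys, List.foldl_map]

-- ===== VERDICT (by name: the statement is the Claim_ definition above) =====
theorem preparse_contactPoints_spec : Claim_equal_preparse_contactPoints := by
  intro fields _ _
  unfold Spec_preparse_contactPoints
  rw [pvA_eq, pvB_eq]
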